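-- pv_equiv track=rewrite | github.com/btxchain/btx | test/reference/generate_shielded_test_vectors.py | verify_challenge_structure
-- ===== SOURCE A (Python) =====
-- POLY_Q = 8380417
--
-- BETA_CHALLENGE = 60
--
-- def verify_challenge_structure(challenge, beta=BETA_CHALLENGE):
--     """
--     Verify that a challenge polynomial has the correct structure:
--     - Exactly beta non-zero coefficients
--     - Each non-zero is +1 or -1 (mod q)
--     """
--     non_zero_count = 0
--     for c in challenge:
--         c_mod = c % POLY_Q
--         if c_mod == 0:
--             continue
--         if c_mod != 1 and c_mod != POLY_Q - 1:
--             return False, f"Non-zero coefficient {c_mod} is not +/-1"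
--         non_zero_count += 1
--     if non_zero_count != beta:
--         return False, f"Expected {beta} non-zero coefficients, got {non_zero_count}"
--     return True, "OK"
-- ===== SOURCE B (Python) =====
-- POLY_Q = 8380417
--
-- BETA_CHALLENGE = 60
--
-- def verify_challenge_structure(challenge, beta=BETA_CHALLENGE):
--     # Counting identity: every residue is 0, 1 or q-1 iff those three counts
--     # sum to the length; the first offender is located only when that fails.
--     residues = [c % POLY_Q for c in challenge]
--     n_zero = residues.count(0)
--     n_one = residues.count(1)
--     n_neg = residues.count(POLY_Q - 1)
--     if n_zero + n_one + n_neg != len(residues):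
--         bad = next(r for r in residues if r not in (0, 1, POLY_Q - 1))
--         return False, f"Non-zero coefficient {bad} is not +/-1"
--     if n_one + n_neg != beta:
--         return False, f"Expected {beta} non-zero coefficients, got {n_one + n_neg}"
--     return True, "OK"
-- ===== Notes on version B (the rewrite author's own statement) =====
-- stated objective: alternative
-- what changed: Replaces A's single early-returning loop with a counting-identity check: count residues equal to 0, 1 and q-1, decide validity by whether the counts sum to the length and compare n_one+n_neg to beta, scanning for the first offending residue only in the failure branch.
import Mathlib
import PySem

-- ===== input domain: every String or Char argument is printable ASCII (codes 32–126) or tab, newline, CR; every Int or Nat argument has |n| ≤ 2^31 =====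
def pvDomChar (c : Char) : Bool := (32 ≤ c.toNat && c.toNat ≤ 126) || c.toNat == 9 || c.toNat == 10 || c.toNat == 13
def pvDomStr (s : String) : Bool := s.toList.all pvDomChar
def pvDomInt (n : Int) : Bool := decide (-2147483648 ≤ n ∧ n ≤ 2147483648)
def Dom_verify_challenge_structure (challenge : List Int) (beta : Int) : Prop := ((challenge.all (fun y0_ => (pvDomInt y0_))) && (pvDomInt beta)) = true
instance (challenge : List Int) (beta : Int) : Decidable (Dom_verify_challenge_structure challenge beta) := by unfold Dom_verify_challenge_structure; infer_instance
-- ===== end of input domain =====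

-- B replaces A's fused early-returning loop with an aggregate counting-identity check
-- (count residues 0 / 1 / q-1, valid iff the counts sum to the length); same O(n) cost.

-- ===== PORT A =====
-- A's for-loop with its running counter and early returns, as structural recursion.
def vcsLoopA (l : List Int) (cnt : Int) (beta : Int) : Bool × String :=
  match l with
  | [] =>
      if cnt ≠ beta then
        (false, "Expected " ++ PySem.Int.toStr beta ++ " non-zero coefficients, got " ++ PySem.Int.toStr cnt)
      else (true, "OK")
  | c :: rest =>
      let c_mod := PySem.Int.mod c 8380417
      if c_mod = 0 then vcsLoopA rest cnt beta
      else if c_mod ≠ 1 ∧ c_mod ≠ 8380416 then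
        (false, "Non-zero coefficient " ++ PySem.Int.toStr c_mod ++ " is not +/-1")
      else vcsLoopA rest (cnt + 1) beta

def verify_challenge_structure (challenge : List Int) (beta : Int) : Bool × String :=
  vcsLoopA challenge 0 beta

-- ===== PORT B =====
def verify_challenge_structure_alt (challenge : List Int) (beta : Int) : Bool × String :=
  let residues := challenge.map (fun c => PySem.Int.mod c 8380417)
  let n_zero := residues.count 0
  let n_one := residues.count 1
  let n_neg := residues.count 8380416
  if n_zero + n_one + n_neg ≠ residues.length then
    -- Python's `next(...)` always finds an element here (the count identity failed), so `.getD 0` is unreachable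
    let bad := (residues.find? (fun r => !(r == 0 || r == 1 || r == 8380416))).getD 0
    (false, "Non-zero coefficient " ++ PySem.Int.toStr bad ++ " is not +/-1")
  else if ((n_one : Int) + (n_neg : Int)) ≠ beta then
    (false, "Expected " ++ PySem.Int.toStr beta ++ " non-zero coefficients, got " ++ PySem.Int.toStr ((n_one : Int) + (n_neg : Int)))
  else (true, "OK")

-- ===== PRECONDITION & SPEC =====
def Spec_verify_challenge_structure (challenge : List Int) (beta : Int) (out : Bool × String) : Prop := out = verify_challenge_structure_alt challenge beta
instance (challenge : List Int) (beta : Int) (out : Bool × String) : Decidable (Spec_verify_challenge_structure challenge beta out) := by unfold Spec_verify_challenge_structure; infer_instance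

-- ===== CLAIM (what is proved, stated in full; the proofs are below) =====
def Claim_equal_verify_challenge_structure : Prop := ∀ (challenge : List Int) (beta : Int), Dom_verify_challenge_structure challenge beta → Spec_verify_challenge_structure challenge beta (verify_challenge_structure challenge beta)

-- ===== LEMMAS AND PROOFS =====

-- the three counts sum to the number of elements lying in {0, 1, q-1}
lemma counts_eq_countP (l : List Int) :
    l.count 0 + l.count 1 + l.count 8380416
      = l.countP (fun r => r == 0 || r == 1 || r == 8380416) := by
  induction l with
  | nil => rfl
  | cons x xs ih =>
      simp only [List.count_cons, List.countP_cons]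
      by_cases h0 : x = 0
      · subst h0; simp; omega
      · by_cases h1 : x = 1
        · subst h1; simp; omega
        · by_cases h2 : x = (8380416 : Int)
          · subst h2; simp; omega
          · simp [h0, h1, h2, ih]

lemma vcsLoopA_eq (l : List Int) (cnt beta : Int) :
    vcsLoopA l cnt beta =
      (let residues := l.map (fun c => PySem.Int.mod c 8380417)
       let n_zero := residues.count 0
       let n_one := residues.count 1
       let n_neg := residues.count 8380416
       if n_zero + n_one + n_neg ≠ residues.length then
         let bad := (residues.find? (fun r => !(r == 0 || r == 1 || r == 8380416))).getD 0
         (false, "Non-zero coefficient " ++ PySem.Int.toStr bad ++ " is not +/-1")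
       else if cnt + (n_one + n_neg : Int) ≠ beta then
         (false, "Expected " ++ PySem.Int.toStr beta ++ " non-zero coefficients, got " ++ PySem.Int.toStr (cnt + (n_one + n_neg : Int)))
       else (true, "OK")) := by
  induction l generalizing cnt with
  | nil => simp [vcsLoopA]
  | cons c rest ih =>
      simp only [vcsLoopA, List.map_cons, List.length_cons]
      set m := PySem.Int.mod c 8380417 with hm
      set r := rest.map (fun c => PySem.Int.mod c 8380417) with hr
      set P := (fun r : Int => !(r == 0 || r == 1 || r == 8380416)) with hP
      by_cases h0 : m = 0
      · rw [if_pos h0, ih cnt, h0]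
        rw [show List.count 0 ((0:Int)::r) = r.count 0 + 1 by simp,
            show List.count 1 ((0:Int)::r) = r.count 1 by simp,
            show List.count 8380416 ((0:Int)::r) = r.count 8380416 by simp,
            show List.find? P ((0:Int)::r) = List.find? P r from List.find?_cons_of_neg (by rw [hP]; decide)]
        by_cases hc : r.count 0 + r.count 1 + r.count 8380416 = r.length
        · rw [if_neg (by omega : ¬(r.count 0 + 1 + r.count 1 + r.count 8380416 ≠ r.length + 1)),
              if_neg (by omega : ¬(r.count 0 + r.count 1 + r.count 8380416 ≠ r.length))]
        · rw [if_pos (by omega : r.count 0 + 1 + r.count 1 + r.count 8380416 ≠ r.length + 1),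
              if_pos (by omega : r.count 0 + r.count 1 + r.count 8380416 ≠ r.length)]
      · rw [if_neg h0]
        have hcount : r.count 0 + r.count 1 + r.count 8380416 ≤ r.length := by
          rw [counts_eq_countP]; exact List.countP_le_length
        by_cases hb : m ≠ 1 ∧ m ≠ 8380416
        · rw [if_pos hb]
          have hm0 : (m == (0:Int)) = false := by simp [h0]
          have hm1 : (m == (1:Int)) = false := by simp [hb.1]
          have hm2 : (m == (8380416:Int)) = false := by simp [hb.2]
          rw [show List.count 0 (m::r) = r.count 0 by simp [List.count_cons, hm0],
              show List.count 1 (m::r) = r.count 1 by simp [List.count_cons, hm1],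
              show List.count 8380416 (m::r) = r.count 8380416 by simp [List.count_cons, hm2],
              show List.find? P (m::r) = some m from List.find?_cons_of_pos (by rw [hP]; simp [hm0, hm1, hm2]),
              if_pos (by omega : r.count 0 + r.count 1 + r.count 8380416 ≠ r.length + 1)]
          rfl
        · have hgood : m = 1 ∨ m = 8380416 := by
            rcases not_and_or.mp hb with h | h
            · exact Or.inl (not_not.mp h)
            · exact Or.inr (not_not.mp h)
          rw [if_neg hb, ih (cnt + 1)]
          rcases hgood with h | h
          · rw [h,
              show List.count 0 ((1:Int)::r) = r.count 0 by simp,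
              show List.count 1 ((1:Int)::r) = r.count 1 + 1 by simp,
              show List.count 8380416 ((1:Int)::r) = r.count 8380416 by simp,
              show List.find? P ((1:Int)::r) = List.find? P r from List.find?_cons_of_neg (by rw [hP]; decide)]
            by_cases hc : r.count 0 + r.count 1 + r.count 8380416 = r.length
            · rw [if_neg (by omega : ¬(r.count 0 + (r.count 1 + 1) + r.count 8380416 ≠ r.length + 1)),
                  if_neg (by omega : ¬(r.count 0 + r.count 1 + r.count 8380416 ≠ r.length)),
                  show ((r.count 1 + 1 : Nat) : Int) = (r.count 1 : Int) + 1 by push_cast; ring,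
                  show cnt + ((r.count 1 : Int) + 1 + (r.count 8380416 : Int)) = cnt + 1 + ((r.count 1 : Int) + (r.count 8380416 : Int)) by ring]
            · rw [if_pos (by omega : r.count 0 + (r.count 1 + 1) + r.count 8380416 ≠ r.length + 1),
                  if_pos (by omega : r.count 0 + r.count 1 + r.count 8380416 ≠ r.length)]
          · rw [h,
              show List.count 0 ((8380416:Int)::r) = r.count 0 by simp,
              show List.count 1 ((8380416:Int)::r) = r.count 1 by simp,
              show List.count 8380416 ((8380416:Int)::r) = r.count 8380416 + 1 by simp,
              show List.find? P ((8380416:Int)::r) = List.find? P r from List.find?_cons_of_neg (by rw [hP]; decide)]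
            by_cases hc : r.count 0 + r.count 1 + r.count 8380416 = r.length
            · rw [if_neg (by omega : ¬(r.count 0 + r.count 1 + (r.count 8380416 + 1) ≠ r.length + 1)),
                  if_neg (by omega : ¬(r.count 0 + r.count 1 + r.count 8380416 ≠ r.length)),
                  show ((r.count 8380416 + 1 : Nat) : Int) = (r.count 8380416 : Int) + 1 by push_cast; ring,
                  show cnt + ((r.count 1 : Int) + ((r.count 8380416 : Int) + 1)) = cnt + 1 + ((r.count 1 : Int) + (r.count 8380416 : Int)) by ring]
            · rw [if_pos (by omega : r.count 0 + r.count 1 + (r.count 8380416 + 1) ≠ r.length + 1),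
                  if_pos (by omega : r.count 0 + r.count 1 + r.count 8380416 ≠ r.length)]

-- ===== VERDICT (by name: the statement is the Claim_ definition above) =====
theorem verify_challenge_structure_spec : Claim_equal_verify_challenge_structure := by
  intro challenge beta _
  show verify_challenge_structure challenge beta = verify_challenge_structure_alt challenge beta
  rw [verify_challenge_structure, vcsLoopA_eq]
  simp [verify_challenge_structure_alt]
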